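-- pv_equiv track=rewrite | github.com/AugustDanell/Kattis-Assignments | Python/tetris.py | right_cannon_piece
-- ===== SOURCE A (Python) =====
-- def right_cannon_piece(top_row):
--     fits = 0
--
--     # Two rotations
--     for i in range(len(top_row)):
--
--         # Downwards rotation:
--         if(i + 1 < len(top_row)):
--             if(top_row[i] - 1 == top_row[i+1]):
--                 fits += 1
--
--         # Cannon rotation:
--         if(i + 2 < len(top_row)):
--             if(top_row[i] == top_row[i+1] and top_row[i+1] + 1 == top_row[i+2]):
--                 fits += 1
--
--     return fits
-- ===== SOURCE B (Python) =====
-- def right_cannon_piece(top_row):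
--     # Derive the difference table first, then count each rotation with a shaped scan over it.
--     d = [top_row[i + 1] - top_row[i] for i in range(len(top_row) - 1)]
--     down = sum(1 for x in d if x == -1)
--     cannon = sum(1 for j in range(len(d) - 1) if d[j] == 0 and d[j + 1] == 1)
--     return down + cannon
-- ===== Notes on version B (the rewrite author's own statement) =====
-- stated objective: alternative
-- what changed: B first materializes the difference list of adjacent heights, then counts downward fits as occurrences of the value minus-one in it and cannon fits as flat-then-step-up adjacent pairs in it, instead of A's single index loop with inline guarded neighbour comparisons.
import Mathlib
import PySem

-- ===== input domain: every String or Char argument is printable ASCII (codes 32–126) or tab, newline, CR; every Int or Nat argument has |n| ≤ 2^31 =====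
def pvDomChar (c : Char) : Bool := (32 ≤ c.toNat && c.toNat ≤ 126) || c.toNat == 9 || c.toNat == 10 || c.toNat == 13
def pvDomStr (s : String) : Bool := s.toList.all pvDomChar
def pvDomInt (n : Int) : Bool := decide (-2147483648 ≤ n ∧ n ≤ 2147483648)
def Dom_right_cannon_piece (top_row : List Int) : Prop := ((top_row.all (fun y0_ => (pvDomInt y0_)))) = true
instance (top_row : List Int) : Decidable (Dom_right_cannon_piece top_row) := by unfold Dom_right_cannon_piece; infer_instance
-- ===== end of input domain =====

-- B re-derives the count from a materialized difference list (two shaped scans) instead of A's single guarded index loop; same O(n) cost.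


-- ===== PORT A =====
-- Indices accessed by A are always in range (the guards ensure it), so List.getD is exact here.
def right_cannon_piece (top_row : List Int) : Int :=
  (List.range top_row.length).foldl (fun fits i =>
    let fits := if i + 1 < top_row.length then
        (if top_row.getD i 0 - 1 = top_row.getD (i + 1) 0 then fits + 1 else fits)
      else fits
    if i + 2 < top_row.length then
      (if top_row.getD i 0 = top_row.getD (i + 1) 0 ∧
          top_row.getD (i + 1) 0 + 1 = top_row.getD (i + 2) 0 then fits + 1 else fits)
    else fits) 0

-- ===== PORT B =====
def right_cannon_piece_alt (top_row : List Int) : Int :=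
  let d := (List.range (top_row.length - 1)).map
    (fun i => top_row.getD (i + 1) 0 - top_row.getD i 0)
  let down := (d.filter (fun x => x = -1)).length
  let cannon := ((List.range (d.length - 1)).filter
    (fun j => decide (d.getD j 0 = 0 ∧ d.getD (j + 1) 0 = 1))).length
  (down : Int) + (cannon : Int)

-- ===== PRECONDITION & SPEC =====
def Spec_right_cannon_piece (top_row : List Int) (out : Int) : Prop := out = right_cannon_piece_alt top_row
instance (top_row : List Int) (out : Int) : Decidable (Spec_right_cannon_piece top_row out) := by unfold Spec_right_cannon_piece; infer_instance

-- ===== CLAIM (what is proved, stated in full; the proofs are below) =====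
def Claim_equal_right_cannon_piece : Prop := ∀ (top_row : List Int), Dom_right_cannon_piece top_row → Spec_right_cannon_piece top_row (right_cannon_piece top_row)

-- ===== LEMMAS AND PROOFS =====

-- sum of Int-valued indicators equals the filter length
theorem pv_sum_indicator {α : Type} (p : α → Bool) (l : List α) :
    (l.map (fun a => if p a then (1 : Int) else 0)).sum = ((l.filter p).length : Int) := by
  induction l with
  | nil => simp
  | cons a l ih =>
    by_cases h : p a <;> simp [h, ih] <;> omega

-- fold of "acc + g i" is the sum of the g's
theorem pv_foldl_add (g : Nat → Int) (l : List Nat) (a : Int) :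
    l.foldl (fun acc i => acc + g i) a = a + (l.map g).sum := by
  induction l generalizing a with
  | nil => simp
  | cons x l ih => simp [List.foldl_cons, ih, add_assoc]

-- summing two indicators splits
theorem pv_sum_map_add (f g : Nat → Int) (l : List Nat) :
    (l.map (fun i => f i + g i)).sum = (l.map f).sum + (l.map g).sum := by
  induction l with
  | nil => simp
  | cons x l ih => simp [ih]; ring

-- a range-bound guard inside the indicator shortens the range
theorem pv_range_guard (n k : Nat) (p : Nat → Bool) :
    ((List.range n).map (fun i => if i + k < n ∧ p i then (1 : Int) else 0)).sum
      = ((List.range (n - k)).map (fun i => if p i then (1 : Int) else 0)).sum := by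
  have h1 : List.range n = List.range (n - k) ++ (List.range (n - (n - k))).map (fun j => (n - k) + j) := by
    rw [← List.range_add]
    congr 1
    omega
  rw [h1, List.map_append, List.sum_append]
  have h2 : ((List.range (n - (n - k))).map (fun j => (n - k) + j)).map
      (fun i => if i + k < n ∧ p i then (1 : Int) else 0) = (List.range (n - (n - k))).map (fun _ => (0 : Int)) := by
    rw [List.map_map]
    apply List.map_congr_left
    intro j hj
    simp only [Function.comp]
    have : ¬ ((n - k) + j + k < n) := by omega
    simp [this]
  rw [h2]
  have h3 : ((List.range (n - k)).map (fun i => if i + k < n ∧ p i then (1 : Int) else 0))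
      = (List.range (n - k)).map (fun i => if p i then (1 : Int) else 0) := by
    apply List.map_congr_left
    intro i hi
    have hi' : i < n - k := List.mem_range.mp hi
    have : i + k < n := by omega
    simp [this]
  rw [h3]
  simp

-- getD of a map over a range
theorem pv_getD_map_range (f : Nat → Int) (m j : Nat) (hj : j < m) :
    (((List.range m).map f).getD j 0) = f j := by
  rw [List.getD_eq_getElem?_getD, List.getElem?_map, List.getElem?_range hj]
  rfl

theorem right_cannon_piece_spec : Claim_equal_right_cannon_piece := by
  intro t _
  unfold Spec_right_cannon_piece right_cannon_piece right_cannon_piece_alt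
  set n := t.length with hn
  set c1 : Nat → Bool := fun i => decide (t.getD i 0 - 1 = t.getD (i + 1) 0) with hc1
  set c2 : Nat → Bool := fun i =>
    decide (t.getD i 0 = t.getD (i + 1) 0 ∧ t.getD (i + 1) 0 + 1 = t.getD (i + 2) 0) with hc2
  -- A's loop body is "accumulate the two indicators"
  have hbody : (fun (fits : Int) (i : Nat) =>
      let fits := if i + 1 < n then
          (if t.getD i 0 - 1 = t.getD (i + 1) 0 then fits + 1 else fits)
        else fits
      if i + 2 < n then
        (if t.getD i 0 = t.getD (i + 1) 0 ∧
            t.getD (i + 1) 0 + 1 = t.getD (i + 2) 0 then fits + 1 else fits)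
      else fits)
      = (fun (fits : Int) (i : Nat) => fits +
          ((if i + 1 < n ∧ c1 i then (1 : Int) else 0) +
           (if i + 2 < n ∧ c2 i then (1 : Int) else 0))) := by
    funext fits i
    simp only [hc1, hc2, decide_eq_true_eq]
    split_ifs <;> omega
  rw [hbody, pv_foldl_add, pv_sum_map_add, pv_range_guard, pv_range_guard,
      pv_sum_indicator, pv_sum_indicator]
  -- now the B side
  set f : Nat → Int := fun i => t.getD (i + 1) 0 - t.getD i 0 with hf
  have hdlen : ((List.range (n - 1)).map f).length = n - 1 := by simp
  have hdownlen : (((List.range (n - 1)).map f).filter (fun x => decide (x = -1))).length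
      = ((List.range (n - 1)).filter c1).length := by
    rw [List.filter_map, List.length_map]
    congr 1
    apply List.filter_congr
    intro i _
    simp only [Function.comp_apply, hf, hc1, decide_eq_decide]
    omega
  have hcan : ((List.range (((List.range (n - 1)).map f).length - 1)).filter
      (fun j => decide ((((List.range (n - 1)).map f).getD j 0 = 0) ∧
                        (((List.range (n - 1)).map f).getD (j + 1) 0 = 1))))
      = (List.range (n - 2)).filter c2 := by
    rw [hdlen]
    have hnn : n - 1 - 1 = n - 2 := by omega
    rw [hnn]
    apply List.filter_congr
    intro j hj
    have hj' : j < n - 2 := List.mem_range.mp hj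
    rw [pv_getD_map_range f (n - 1) j (by omega), pv_getD_map_range f (n - 1) (j + 1) (by omega)]
    have h12 : j + 1 + 1 = j + 2 := by omega
    simp only [hf, hc2, h12, decide_eq_decide]
    omega
  dsimp only
  rw [hcan, hdownlen]
  omega
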